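-- pv_equiv track=rewrite | github.com/alikbek3002/ruts_project | apps/api/app/modules/streams/scheduler.py | group_classes_optimally
-- ===== SOURCE A (Python) =====
-- from typing import List, Dict, Any, Optional, Set, Tuple
--
-- def group_classes_optimally(class_ids: List[str], min_group: int = 2, max_group: int = 4) -> List[List[str]]:
--     """
--     Group classes for shared lessons (2-4 vzvodы per lesson)
--     Returns list of class groups
--     """
--     groups = []
--     remaining = class_ids.copy()
--
--     while remaining:
--         # Try to take max_group classes
--         group_size = min(max_group, len(remaining))
--         # But ensure last group isn't too small
--         if len(remaining) - group_size > 0 and len(remaining) - group_size < min_group: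
--             group_size = len(remaining) - min_group
--
--         if group_size >= min_group:
--             group = remaining[:group_size]
--             groups.append(group)
--             remaining = remaining[group_size:]
--         else:
--             # Last small group, add to previous or make single
--             if groups and len(groups[-1]) < max_group:
--                 groups[-1].extend(remaining)
--             else:
--                 groups.append(remaining)
--             remaining = []
--
--     return groups
-- ===== SOURCE B (Python) =====
-- def group_classes_optimally(class_ids, min_group=2, max_group=4):
--     n = len(class_ids)
--     if n == 0:
--         return []
--     if max_group <= 0 or min_group > max_group or n <= max_group:
--         return [list(class_ids)]
--     q, r = divmod(n, max_group)
--     if r == 0: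
--         sizes = [max_group] * q
--     elif r >= min_group:
--         sizes = [max_group] * q + [r]
--     elif max_group + r >= 2 * min_group:
--         sizes = [max_group] * (q - 1) + [max_group + r - min_group, min_group]
--     else:
--         sizes = [max_group] * (q - 1) + [max_group + r]
--     out = []
--     i = 0
--     for s in sizes:
--         out.append(class_ids[i:i + s])
--         i += s
--     return out
-- ===== Notes on version B (the rewrite author's own statement) =====
-- stated objective: alternative
-- what changed: replaces A's while-loop that repeatedly re-slices the remaining list with a divmod-based closed form computing all group sizes at once, followed by one index-slicing pass
-- outside the precondition, e.g. on group_classes_optimally(['a'], 0, 0): A does not finish within the time limit, B returns [['a']]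
import Mathlib
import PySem

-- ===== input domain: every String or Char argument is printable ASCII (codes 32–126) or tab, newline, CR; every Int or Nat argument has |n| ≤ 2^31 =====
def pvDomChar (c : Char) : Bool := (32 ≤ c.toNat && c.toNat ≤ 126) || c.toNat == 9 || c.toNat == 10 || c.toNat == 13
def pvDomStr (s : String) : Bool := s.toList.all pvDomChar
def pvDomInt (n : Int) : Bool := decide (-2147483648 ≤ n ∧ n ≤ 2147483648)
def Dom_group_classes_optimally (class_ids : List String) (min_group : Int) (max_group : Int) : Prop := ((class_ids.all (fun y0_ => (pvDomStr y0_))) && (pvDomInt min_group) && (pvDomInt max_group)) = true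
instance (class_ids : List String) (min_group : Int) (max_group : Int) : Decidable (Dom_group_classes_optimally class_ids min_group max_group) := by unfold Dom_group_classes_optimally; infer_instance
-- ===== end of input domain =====

-- B computes all group sizes with one divmod closed form up front and slices once per group,
-- instead of A's while loop that repeatedly re-slices the remaining list.


-- ===== PORT A =====
-- the while loop, with fuel only to make it total (inside Pre_ every taken branch
-- removes at least one element, so fuel = length + 1 is never exhausted);
-- when the else-branch runs, remaining is set to [] and the loop exits, so we return directly
def aloop (fuel : Nat) (min_group max_group : Int) (groups : List (List String)) (remaining : List String) : List (List String) :=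
  match fuel with
  | 0 => groups
  | fuel + 1 =>
    if remaining = [] then groups
    else
      let m : Int := remaining.length
      let gs0 : Int := min max_group m
      let gs : Int := if 0 < m - gs0 ∧ m - gs0 < min_group then m - min_group else gs0
      if min_group ≤ gs then
        aloop fuel min_group max_group
          (groups ++ [PySem.List.slice remaining none (some gs)])
          (PySem.List.slice remaining (some gs) none)
      else
        if groups ≠ [] ∧ (((groups.getLast?.getD []).length : Int) < max_group) then
          groups.dropLast ++ [(groups.getLast?.getD []) ++ remaining]
        else
          groups ++ [remaining]

def group_classes_optimally (class_ids : List String) (min_group : Int) (max_group : Int) : List (List String) :=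
  aloop (class_ids.length + 1) min_group max_group [] class_ids

-- ===== PORT B =====
-- the final for loop of Source B: out.append(class_ids[i:i+s]); i += s
def bout (class_ids : List String) (i : Int) (sizes : List Int) : List (List String) :=
  match sizes with
  | [] => []
  | s :: t => PySem.List.slice class_ids (some i) (some (i + s)) :: bout class_ids (i + s) t

def group_classes_optimally_alt (class_ids : List String) (min_group : Int) (max_group : Int) : List (List String) :=
  let n : Int := class_ids.length
  if n = 0 then []
  else if max_group ≤ 0 ∨ max_group < min_group ∨ n ≤ max_group then [class_ids]
  else
    match PySem.Int.divmod? n max_group with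
    | none => []   -- unreachable: max_group ≠ 0 here
    | some (q, r) =>
      let sizes : List Int :=
        if r = 0 then List.replicate q.toNat max_group
        else if min_group ≤ r then List.replicate q.toNat max_group ++ [r]
        else if 2 * min_group ≤ max_group + r then
          List.replicate (q - 1).toNat max_group ++ [max_group + r - min_group, min_group]
        else List.replicate (q - 1).toNat max_group ++ [max_group + r]
      bout class_ids 0 sizes

-- ===== PRECONDITION & SPEC =====
-- Pre_ excludes exactly the nonempty inputs with min_group ≤ max_group ≤ 0,
-- on which A's while loop never terminates (it re-appends empty/stalling slices forever).
def Pre_group_classes_optimally (class_ids : List String) (min_group : Int) (max_group : Int) : Prop :=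
  class_ids = [] ∨ 0 < max_group ∨ max_group < min_group
instance (class_ids : List String) (min_group : Int) (max_group : Int) : Decidable (Pre_group_classes_optimally class_ids min_group max_group) := by unfold Pre_group_classes_optimally; infer_instance

def pvWitness_group_classes_optimally : List String × Int × Int := (["1a", "1b", "2a", "2b", "3a"], 2, 4)

def Spec_group_classes_optimally (class_ids : List String) (min_group : Int) (max_group : Int) (out : List (List String)) : Prop := out = group_classes_optimally_alt class_ids min_group max_group
instance (class_ids : List String) (min_group : Int) (max_group : Int) (out : List (List String)) : Decidable (Spec_group_classes_optimally class_ids min_group max_group out) := by unfold Spec_group_classes_optimally; infer_instance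

-- ===== CLAIM (what is proved, stated in full; the proofs are below) =====
def Claim_equal_group_classes_optimally : Prop := ∀ (class_ids : List String) (min_group : Int) (max_group : Int), Dom_group_classes_optimally class_ids min_group max_group → Pre_group_classes_optimally class_ids min_group max_group → Spec_group_classes_optimally class_ids min_group max_group (group_classes_optimally class_ids min_group max_group)

-- ===== LEMMAS AND PROOFS =====

-- proof-side take/drop view of splitting by a size list
def chunkS (rest : List String) (sizes : List Int) : List (List String) :=
  match sizes with
  | [] => []
  | s :: t => rest.take s.toNat :: chunkS (rest.drop s.toNat) t

-- proof-side size list as a function of the length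
def sizesS (m min_group max_group : Int) : List Int :=
  let q := PySem.Int.floordiv m max_group
  let r := PySem.Int.mod m max_group
  if r = 0 then List.replicate q.toNat max_group
  else if min_group ≤ r then List.replicate q.toNat max_group ++ [r]
  else if 2 * min_group ≤ max_group + r then
    List.replicate (q - 1).toNat max_group ++ [max_group + r - min_group, min_group]
  else List.replicate (q - 1).toNat max_group ++ [max_group + r]

-- the value B computes on a nonempty list (given 0 < max_group, min_group ≤ max_group)
def bspec (rest : List String) (min_group max_group : Int) : List (List String) :=
  if (rest.length : Int) ≤ max_group then [rest]
  else chunkS rest (sizesS rest.length min_group max_group)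

theorem bout_eq_chunkS (ids : List String) (sizes : List Int) (j : Nat)
    (h : ∀ s ∈ sizes, 0 ≤ s) :
    bout ids (j : Int) sizes = chunkS (ids.drop j) sizes := by
  induction sizes generalizing j with
  | nil => simp [bout, chunkS]
  | cons s t ih =>
    obtain ⟨k, rfl⟩ : ∃ k : Nat, s = (k : Int) := ⟨s.toNat, by have := h s (by simp); omega⟩
    rw [bout, chunkS, PySem.List.slice_natCast_add]
    have hj : ((j : Int) + (k : Int)) = ((j + k : Nat) : Int) := by push_cast; ring
    rw [hj, ih (j + k) (fun x hx => h x (List.mem_cons_of_mem _ hx))]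
    simp [List.drop_drop]

theorem bout_eq_chunkS0 (ids : List String) (sizes : List Int)
    (h : ∀ s ∈ sizes, 0 ≤ s) :
    bout ids 0 sizes = chunkS ids sizes := by
  have := bout_eq_chunkS ids sizes 0 h
  simpa using this

theorem alt_eq_bspec (ids : List String) (mn mx : Int) (hmx : 0 < mx) (hmn : mn ≤ mx)
    (hne : ids ≠ []) :
    group_classes_optimally_alt ids mn mx = bspec ids mn mx := by
  have hn : 0 < ids.length := List.length_pos_of_ne_nil hne
  have hn0 : ¬((ids.length : Int) = 0) := by omega
  unfold group_classes_optimally_alt bspec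
  by_cases hle : (ids.length : Int) ≤ mx
  · rw [if_neg hn0, if_pos (Or.inr (Or.inr hle)), if_pos hle]
  · rw [if_neg hn0, if_neg (by push_neg; exact ⟨by omega, by omega, by omega⟩), if_neg hle]
    rw [show PySem.Int.divmod? ((ids.length : Nat) : Int) mx
          = some (PySem.Int.floordiv ((ids.length : Nat) : Int) mx,
                  PySem.Int.mod ((ids.length : Nat) : Int) mx) from by
        simp [PySem.Int.divmod?, hmx.ne', PySem.Int.floordiv, PySem.Int.mod]]
    have hr0 : 0 ≤ PySem.Int.mod ((ids.length : Nat) : Int) mx := PySem.Int.mod_nonneg _ hmx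
    dsimp only [sizesS]
    exact bout_eq_chunkS0 ids _ (by
      intro s hs
      split_ifs at hs <;>
        simp only [List.mem_append, List.mem_replicate, List.mem_cons,
          List.not_mem_nil, or_false] at hs <;> omega)

theorem bspec_one (rest : List String) (mn mx : Int) (hmx : 0 < mx) (hmn : mn ≤ mx)
    (h1 : mx < (rest.length : Int)) (h2 : (rest.length : Int) - mx < mn)
    (h3 : (rest.length : Int) < 2 * mn) :
    bspec rest mn mx = [rest] := by
  have hq : PySem.Int.floordiv ((rest.length : Nat) : Int) mx = 1 := by
    rw [PySem.Int.floordiv_eq_iff_of_pos hmx]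
    constructor <;> nlinarith
  have hqr := PySem.Int.floordiv_mul_add_mod ((rest.length : Nat) : Int) mx
  rw [hq, one_mul] at hqr
  unfold bspec
  rw [if_neg (by omega), sizesS]
  simp only [hq, show PySem.Int.mod ((rest.length : Nat) : Int) mx = (rest.length : Int) - mx by omega]
  rw [if_neg (by omega : ¬((rest.length : Int) - mx = 0)),
    if_neg (by omega : ¬(mn ≤ (rest.length : Int) - mx)),
    if_neg (by omega : ¬(2 * mn ≤ mx + ((rest.length : Int) - mx)))]
  norm_num [chunkS]

theorem bspec_two (rest : List String) (mn mx : Int) (hmx : 0 < mx) (hmn : mn ≤ mx)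
    (h1 : mx < (rest.length : Int)) (h2 : (rest.length : Int) - mx < mn)
    (h3 : 2 * mn ≤ (rest.length : Int)) :
    bspec rest mn mx = [rest.take ((rest.length : Int) - mn).toNat,
                        rest.drop ((rest.length : Int) - mn).toNat] := by
  have hq : PySem.Int.floordiv ((rest.length : Nat) : Int) mx = 1 := by
    rw [PySem.Int.floordiv_eq_iff_of_pos hmx]
    constructor <;> nlinarith
  have hqr := PySem.Int.floordiv_mul_add_mod ((rest.length : Nat) : Int) mx
  rw [hq, one_mul] at hqr
  unfold bspec
  rw [if_neg (by omega), sizesS]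
  simp only [hq, show PySem.Int.mod ((rest.length : Nat) : Int) mx = (rest.length : Int) - mx by omega]
  rw [if_neg (by omega : ¬((rest.length : Int) - mx = 0)),
    if_neg (by omega : ¬(mn ≤ (rest.length : Int) - mx)),
    if_pos (by omega : 2 * mn ≤ mx + ((rest.length : Int) - mx)),
    show mx + ((rest.length : Int) - mx) - mn = (rest.length : Int) - mn by ring]
  norm_num [chunkS]
  omega

theorem bspec_peel (rest : List String) (mn mx : Int) (hmx : 0 < mx) (hmn : mn ≤ mx)
    (h1 : mx < (rest.length : Int)) (h2 : mn ≤ (rest.length : Int) - mx) :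
    bspec rest mn mx = rest.take mx.toNat :: bspec (rest.drop mx.toNat) mn mx := by
  have hqr := PySem.Int.floordiv_mul_add_mod ((rest.length : Nat) : Int) mx
  have hr0 : 0 ≤ PySem.Int.mod ((rest.length : Nat) : Int) mx := PySem.Int.mod_nonneg _ hmx
  have hrlt : PySem.Int.mod ((rest.length : Nat) : Int) mx < mx := PySem.Int.mod_lt _ hmx
  have hmxnat : mx.toNat ≤ rest.length := by omega
  have hlen : (((rest.drop mx.toNat).length : Nat) : Int) = (rest.length : Int) - mx := by
    rw [List.length_drop]; omega
  unfold bspec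
  rw [if_neg (by omega), hlen]
  by_cases hc : (rest.length : Int) - mx ≤ mx
  · rw [if_pos hc]
    by_cases hm2 : (rest.length : Int) = 2 * mx
    · have hq2 : PySem.Int.floordiv ((rest.length : Nat) : Int) mx = 2 := by
        rw [PySem.Int.floordiv_eq_iff_of_pos hmx]
        constructor <;> omega
      have hr2 : PySem.Int.mod ((rest.length : Nat) : Int) mx = 0 := by
        rw [hq2] at hqr; omega
      rw [sizesS]
      simp only [hq2, hr2]
      norm_num [chunkS, List.replicate, show ((2:Int).toNat) = 2 from rfl]
      omega
    · have hq2 : PySem.Int.floordiv ((rest.length : Nat) : Int) mx = 1 := by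
        rw [PySem.Int.floordiv_eq_iff_of_pos hmx]
        constructor <;> omega
      have hr2 : PySem.Int.mod ((rest.length : Nat) : Int) mx = (rest.length : Int) - mx := by
        rw [hq2] at hqr; omega
      rw [sizesS]
      simp only [hq2, hr2]
      rw [if_neg (by omega : ¬((rest.length : Int) - mx = 0)), if_pos h2]
      norm_num [chunkS, List.replicate]
      omega
  · rw [if_neg hc]
    have hq1 : 1 ≤ PySem.Int.floordiv ((rest.length : Nat) : Int) mx :=
      (PySem.Int.le_floordiv_iff_mul_le hmx).mpr (by nlinarith)
    have hq2 : 2 ≤ PySem.Int.floordiv ((rest.length : Nat) : Int) mx :=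
      (PySem.Int.le_floordiv_iff_mul_le hmx).mpr (by nlinarith)
    have hq' : PySem.Int.floordiv ((rest.length : Int) - mx) mx
        = PySem.Int.floordiv ((rest.length : Nat) : Int) mx - 1 := by
      rw [PySem.Int.floordiv_eq_iff_of_pos hmx]
      constructor <;> nlinarith
    have hr' : PySem.Int.mod ((rest.length : Int) - mx) mx
        = PySem.Int.mod ((rest.length : Nat) : Int) mx := by
      have h := PySem.Int.floordiv_mul_add_mod ((rest.length : Int) - mx) mx
      rw [hq'] at h
      linear_combination h - hqr
    rw [sizesS, sizesS, hq', hr']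
    have e1 : (PySem.Int.floordiv ((rest.length : Nat) : Int) mx).toNat
        = (PySem.Int.floordiv ((rest.length : Nat) : Int) mx - 1).toNat + 1 := by omega
    have e2 : (PySem.Int.floordiv ((rest.length : Nat) : Int) mx - 1).toNat
        = (PySem.Int.floordiv ((rest.length : Nat) : Int) mx - 1 - 1).toNat + 1 := by omega
    split_ifs with hb1 hb2 hb3
    · rw [e1, List.replicate_succ]; simp [chunkS]
    · rw [e1, List.replicate_succ]; simp [chunkS]
    · rw [e2, List.replicate_succ]; simp [chunkS]
    · rw [e2, List.replicate_succ]; simp [chunkS]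

theorem aloop_degenerate (mn mx : Int) (hmn : mx < mn) (fuel : Nat)
    (rem : List String) (hne : rem ≠ []) :
    aloop (fuel + 1) mn mx [] rem = [rem] := by
  have hm : 0 < rem.length := List.length_pos_of_ne_nil hne
  simp only [aloop, if_neg hne]
  have hgs : (if 0 < ((rem.length : Nat) : Int) - min mx ((rem.length : Nat) : Int) ∧
        ((rem.length : Nat) : Int) - min mx ((rem.length : Nat) : Int) < mn
      then ((rem.length : Nat) : Int) - mn
      else min mx ((rem.length : Nat) : Int)) < mn := by
    split_ifs <;> omega
  rw [if_neg (by omega)]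
  simp

theorem aloop_main (fuel : Nat) (mn mx : Int) (hmx : 0 < mx) (hmn : mn ≤ mx) :
    ∀ (groups : List (List String)) (rem : List String), rem ≠ [] →
    rem.length ≤ fuel →
    (groups = [] ∨ mx ≤ ((groups.getLast?.getD []).length : Int) ∨ (rem.length : Int) = mn) →
    aloop fuel mn mx groups rem = groups ++ bspec rem mn mx := by
  induction fuel with
  | zero =>
    intro groups rem hne hfu _
    exact absurd hfu (by have := List.length_pos_of_ne_nil hne; omega)
  | succ fuel ih =>
    intro groups rem hne hfu hinv
    have hm1 : 0 < rem.length := List.length_pos_of_ne_nil hne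
    simp only [aloop, if_neg hne]
    by_cases hle : ((rem.length : Nat) : Int) ≤ mx
    · have hgs : (if 0 < ((rem.length : Nat) : Int) - min mx ((rem.length : Nat) : Int) ∧
            ((rem.length : Nat) : Int) - min mx ((rem.length : Nat) : Int) < mn
          then ((rem.length : Nat) : Int) - mn
          else min mx ((rem.length : Nat) : Int)) = ((rem.length : Nat) : Int) := by
        split_ifs <;> omega
      rw [hgs, bspec, if_pos hle]
      by_cases hmnm : mn ≤ ((rem.length : Nat) : Int)
      · rw [if_pos hmnm, PySem.List.slice_to _ (by omega), PySem.List.slice_from _ (by omega),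
          List.take_of_length_le (by omega), List.drop_eq_nil_of_le (by omega)]
        cases fuel <;> simp [aloop]
      · rw [if_neg hmnm]
        rcases hinv with h | h | h
        · subst h; simp
        · rw [if_neg (by push_neg; intro _; omega)]
        · omega
    · by_cases hfire : ((rem.length : Nat) : Int) - mx < mn
      · have hgs : (if 0 < ((rem.length : Nat) : Int) - min mx ((rem.length : Nat) : Int) ∧
              ((rem.length : Nat) : Int) - min mx ((rem.length : Nat) : Int) < mn
            then ((rem.length : Nat) : Int) - mn
            else min mx ((rem.length : Nat) : Int)) = ((rem.length : Nat) : Int) - mn := by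
          split_ifs <;> omega
        rw [hgs]
        by_cases htake : mn ≤ ((rem.length : Nat) : Int) - mn
        · have hmn1 : 1 ≤ mn := by omega
          rw [if_pos htake, PySem.List.slice_to _ (by omega), PySem.List.slice_from _ (by omega)]
          have hlen' : (((rem.drop (((rem.length : Nat) : Int) - mn).toNat).length : Nat) : Int)
              = mn := by
            rw [List.length_drop]; omega
          rw [ih _ _ (by intro hh; rw [hh] at hlen'; simp at hlen'; omega)
            (by rw [List.length_drop]; omega) (Or.inr (Or.inr hlen'))]
          rw [bspec, if_pos (by omega), bspec_two rem mn mx hmx hmn (by omega) hfire (by omega)]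
          simp
        · rw [if_neg (by omega)]
          rw [bspec_one rem mn mx hmx hmn (by omega) hfire (by omega)]
          rcases hinv with h | h | h
          · subst h; simp
          · rw [if_neg (by push_neg; intro _; omega)]
          · omega
      · have hgs : (if 0 < ((rem.length : Nat) : Int) - min mx ((rem.length : Nat) : Int) ∧
              ((rem.length : Nat) : Int) - min mx ((rem.length : Nat) : Int) < mn
            then ((rem.length : Nat) : Int) - mn
            else min mx ((rem.length : Nat) : Int)) = mx := by
          split_ifs <;> omega
        rw [hgs, if_pos hmn, PySem.List.slice_to _ (by omega), PySem.List.slice_from _ (by omega)]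
        have hlen' : (((rem.drop mx.toNat).length : Nat) : Int) = ((rem.length : Nat) : Int) - mx := by
          rw [List.length_drop]; omega
        have hlast : ((((groups ++ [rem.take mx.toNat]).getLast?.getD []).length : Nat) : Int)
            = mx := by
          rw [List.getLast?_concat]
          simp [List.length_take]
          omega
        rw [ih _ _ (by intro hh; rw [hh] at hlen'; simp at hlen'; omega)
          (by rw [List.length_drop]; omega) (Or.inr (Or.inl (le_of_eq hlast.symm)))]
        rw [bspec_peel rem mn mx hmx hmn (by omega) (by omega)]
        simp


-- ===== VERDICT (by name: the statement is the Claim_ definition above) =====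
theorem group_classes_optimally_spec : Claim_equal_group_classes_optimally := by
  intro ids mn mx hdom hpre
  unfold Spec_group_classes_optimally
  by_cases hnil : ids = []
  · subst hnil; simp [group_classes_optimally, group_classes_optimally_alt, aloop]
  · by_cases hmain : 0 < mx ∧ mn ≤ mx
    · rw [group_classes_optimally,
        aloop_main (ids.length + 1) mn mx hmain.1 hmain.2 [] ids hnil (by omega) (Or.inl rfl),
        List.nil_append, alt_eq_bspec ids mn mx hmain.1 hmain.2 hnil]
    · have hdeg : mx < mn := by
        rcases hpre with h | h | h
        · exact absurd h hnil
        · rcases not_and_or.1 hmain with h' | h'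
          · exact absurd h h'
          · omega
        · exact h
      rw [group_classes_optimally, aloop_degenerate mn mx hdeg ids.length ids hnil]
      have hn0 : ¬((ids.length : Int) = 0) := by
        have := List.length_pos_of_ne_nil hnil; omega
      rw [group_classes_optimally_alt]
      simp only [if_neg hn0, if_pos (Or.inr (Or.inl hdeg))]
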